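-- pv_equiv track=rewrite | github.com/cheng1559/nlp | week1/src/cws_lab/model.py | spans_from_tokens
-- ===== SOURCE A (Python) =====
-- from typing import Dict, List, Sequence
--
-- def spans_from_tokens(tokens: Sequence[str]) -> set[tuple[int, int]]:
--     spans: set[tuple[int, int]] = set()
--     offset = 0
--     for token in tokens:
--         start = offset
--         end = offset + len(token)
--         spans.add((start, end))
--         offset = end
--     return spans
-- ===== SOURCE B (Python) =====
-- def spans_from_tokens(tokens):
--     # Divide and conquer: spans of each half computed independently,
--     # right half shifted by the left half's total length.
--     def go(toks):
--         if not toks: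
--             return [], 0
--         if len(toks) == 1:
--             n = len(toks[0])
--             return [(0, n)], n
--         mid = len(toks) // 2
--         left, ln = go(toks[:mid])
--         right, rn = go(toks[mid:])
--         return left + [(s + ln, e + ln) for s, e in right], ln + rn
--     spans, _ = go(list(tokens))
--     return set(spans)
-- ===== Notes on version B (the rewrite author's own statement) =====
-- stated objective: alternative
-- what changed: B computes the span set by divide and conquer: it splits the token list in half, recursively builds each half's span list together with its total length, and shifts the right half's spans by the left half's total, instead of A's single left-to-right loop with a mutable running offset.
import Mathlib
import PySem

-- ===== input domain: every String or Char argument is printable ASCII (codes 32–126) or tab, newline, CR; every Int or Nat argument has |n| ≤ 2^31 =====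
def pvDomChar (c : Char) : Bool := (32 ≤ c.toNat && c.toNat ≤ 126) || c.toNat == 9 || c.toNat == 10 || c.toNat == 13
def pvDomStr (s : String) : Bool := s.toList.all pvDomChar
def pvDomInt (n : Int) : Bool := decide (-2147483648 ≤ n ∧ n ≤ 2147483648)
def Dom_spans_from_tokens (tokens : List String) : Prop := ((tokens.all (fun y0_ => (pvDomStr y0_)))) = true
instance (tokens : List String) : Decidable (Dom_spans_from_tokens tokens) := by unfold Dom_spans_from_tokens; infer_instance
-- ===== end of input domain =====

-- B builds the span set by divide and conquer (split in half, recurse, shift the right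
-- half by the left half's total length) instead of A's single running-offset loop;
-- objective: alternative (similar cost, different algorithm).


-- ===== PORT A =====
def spans_from_tokens (tokens : List String) : List (Int × Int) :=
  (tokens.foldl
    (fun st token =>
      let start := st.2
      let stop := st.2 + PySem.Str.len token
      (PySem.Set.add st.1 (start, stop), stop))
    ((PySem.Set.empty : PySem.Set (Int × Int)), (0 : Int))).1

-- ===== PORT B =====
-- helper `go`: returns (span list of `toks`, total character length of `toks`);
-- the Python slices toks[:mid] / toks[mid:] with 0 ≤ mid ≤ len(toks) are exactly take/drop.
def pvGo (toks : List String) : List (Int × Int) × Int :=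
  match toks with
  | [] => ([], 0)
  | [t] => ([((0 : Int), PySem.Str.len t)], PySem.Str.len t)
  | a :: b :: rest =>
      let mid := (a :: b :: rest).length / 2
      let l := pvGo ((a :: b :: rest).take mid)
      let r := pvGo ((a :: b :: rest).drop mid)
      (l.1 ++ r.1.map (fun p => (p.1 + l.2, p.2 + l.2)), l.2 + r.2)
termination_by toks.length
decreasing_by
  · simp_all; omega
  · simp_all; omega

def spans_from_tokens_alt (tokens : List String) : List (Int × Int) :=
  PySem.Set.ofList (pvGo tokens).1

-- ===== PRECONDITION & SPEC =====
def Spec_spans_from_tokens (tokens : List String) (out : List (Int × Int)) : Prop := out = spans_from_tokens_alt tokens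
instance (tokens : List String) (out : List (Int × Int)) : Decidable (Spec_spans_from_tokens tokens out) := by unfold Spec_spans_from_tokens; infer_instance

-- ===== CLAIM (what is proved, stated in full; the proofs are below) =====
def Claim_equal_spans_from_tokens : Prop := ∀ (tokens : List String), Dom_spans_from_tokens tokens → Spec_spans_from_tokens tokens (spans_from_tokens tokens)

-- ===== LEMMAS AND PROOFS =====

-- the span list both programs conceptually produce, starting at offset `off`
def pvSpans (off : Int) : List String → List (Int × Int)
  | [] => []
  | t :: ts => (off, off + PySem.Str.len t) :: pvSpans (off + PySem.Str.len t) ts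

-- total character length
def pvLen (ts : List String) : Int := (ts.map PySem.Str.len).sum

theorem pvA_fold (tokens : List String) :
    ∀ (s : PySem.Set (Int × Int)) (off : Int),
    (tokens.foldl
      (fun st token =>
        let start := st.2
        let stop := st.2 + PySem.Str.len token
        (PySem.Set.add st.1 (start, stop), stop))
      (s, off)).1 = PySem.Set.update s (pvSpans off tokens) := by
  induction tokens with
  | nil => intro s off; simp [pvSpans, PySem.Set.update]
  | cons t ts ih =>
      intro s off
      simp only [List.foldl]
      rw [ih]
      simp [pvSpans, PySem.Set.update]

theorem pvSpans_shift (ts : List String) :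
    ∀ (a n : Int), pvSpans (a + n) ts = (pvSpans a ts).map (fun p => (p.1 + n, p.2 + n)) := by
  induction ts with
  | nil => intro a n; simp [pvSpans]
  | cons t ts ih =>
      intro a n
      simp only [pvSpans, List.map_cons]
      have h1 : a + n + PySem.Str.len t = (a + PySem.Str.len t) + n := by ring
      rw [h1, ih]

theorem pvSpans_append (xs ys : List String) :
    ∀ (off : Int), pvSpans off (xs ++ ys) = pvSpans off xs ++ pvSpans (off + pvLen xs) ys := by
  induction xs with
  | nil => intro off; simp [pvSpans, pvLen]
  | cons x xs ih =>
      intro off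
      simp only [List.cons_append, pvSpans, ih, pvLen, List.map_cons, List.sum_cons]
      have h : off + PySem.Str.len x + (xs.map PySem.Str.len).sum
          = off + (PySem.Str.len x + (xs.map PySem.Str.len).sum) := by ring
      rw [h]

theorem pvGo_eq (toks : List String) : pvGo toks = (pvSpans 0 toks, pvLen toks) := by
  induction toks using pvGo.induct with
  | case1 => rw [pvGo]; simp [pvSpans, pvLen]
  | case2 t => rw [pvGo]; simp [pvSpans, pvLen]
  | case3 a b rest mid ihl ihr =>
      rw [pvGo]
      simp only [mid] at ihl ihr
      simp only [ihl, ihr]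
      have hsplit : (a :: b :: rest).take ((a :: b :: rest).length / 2)
          ++ (a :: b :: rest).drop ((a :: b :: rest).length / 2) = a :: b :: rest :=
        List.take_append_drop _ (a :: b :: rest)
      rw [Prod.mk.injEq]
      constructor
      · have h2 := pvSpans_append ((a :: b :: rest).take ((a :: b :: rest).length / 2))
          ((a :: b :: rest).drop ((a :: b :: rest).length / 2)) 0
        rw [hsplit] at h2
        rw [h2, pvSpans_shift ((a :: b :: rest).drop ((a :: b :: rest).length / 2)) 0
          (pvLen ((a :: b :: rest).take ((a :: b :: rest).length / 2)))]
      · have h3 : pvLen ((a :: b :: rest).take ((a :: b :: rest).length / 2)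
              ++ (a :: b :: rest).drop ((a :: b :: rest).length / 2)) =
            pvLen ((a :: b :: rest).take ((a :: b :: rest).length / 2))
              + pvLen ((a :: b :: rest).drop ((a :: b :: rest).length / 2)) := by
          simp [pvLen]
        rw [hsplit] at h3
        rw [← h3]

theorem spans_eq (tokens : List String) :
    spans_from_tokens tokens = spans_from_tokens_alt tokens := by
  unfold spans_from_tokens spans_from_tokens_alt
  rw [pvA_fold tokens PySem.Set.empty 0, pvGo_eq]
  exact PySem.Set.update_nil_left _

-- ===== VERDICT (by name: the statement is the Claim_ definition above) =====
theorem spans_from_tokens_spec : Claim_equal_spans_from_tokens := by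
  intro tokens _
  exact spans_eq tokens
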